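-- pv_equiv track=rewrite | github.com/kesterlester/Echinocoder | MinimalConfusableSets/confusable_multisets.py | subset_sums_with_parity
-- ===== SOURCE A (Python) =====
-- from collections import Counter
--
-- def subset_sums_with_parity(rows):
--     """Return (even_counter, odd_counter) for all subset sums of given rows."""
--     n = len(rows)
--     even = Counter()
--     odd = Counter()
--     for mask in range(1 << n):
--         parity = (bin(mask).count("1") % 2)
--         s = [0]*len(rows[0])
--         for i in range(n):
--             if (mask >> i) & 1:
--                 row = rows[i]
--                 for j in range(len(s)):
--                     s[j] += row[j]
--         s_t = tuple(s)
--         if parity == 0: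
--             even[s_t] += 1
--         else:
--             odd[s_t] += 1
--     return even, odd
-- ===== SOURCE B (Python) =====
-- from collections import Counter
--
-- def subset_sums_with_parity(rows):
--     """Return (even_counter, odd_counter) for all subset sums of given rows."""
--     d = len(rows[0])
--     sums = [(0,) * d]
--     pars = [False]
--     for row in rows:
--         sums = sums + [tuple(a + b for a, b in zip(s, row)) for s in sums]
--         pars = pars + [not p for p in pars]
--     even = Counter()
--     odd = Counter()
--     for s, p in zip(sums, pars):
--         if not p:
--             even[s] += 1
--         else:
--             odd[s] += 1
--     return even, odd
-- ===== Notes on version B (the rewrite author's own statement) =====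
-- stated objective: alternative
-- what changed: Instead of recomputing each subset sum from scratch per mask (popcount + scan of all n rows), B builds the list of all subset sums and parities by doubling it once per row and then counts in a single pass (intended as faster, O(2^n*d) vs O(2^n*n*d); a timing run measured only ~1.7x at the largest size both finished).
import Mathlib
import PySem

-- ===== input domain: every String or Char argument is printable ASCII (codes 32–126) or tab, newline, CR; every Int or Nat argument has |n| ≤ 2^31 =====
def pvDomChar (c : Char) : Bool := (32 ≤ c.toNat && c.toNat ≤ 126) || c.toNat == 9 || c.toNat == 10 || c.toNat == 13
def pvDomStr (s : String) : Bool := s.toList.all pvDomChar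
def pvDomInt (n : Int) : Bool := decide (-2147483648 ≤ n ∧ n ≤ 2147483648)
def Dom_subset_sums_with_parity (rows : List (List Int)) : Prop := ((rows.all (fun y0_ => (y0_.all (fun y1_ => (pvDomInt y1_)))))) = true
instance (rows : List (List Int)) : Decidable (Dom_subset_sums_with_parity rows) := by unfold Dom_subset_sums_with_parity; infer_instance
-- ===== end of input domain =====

-- B replaces A's per-mask recomputation of each subset sum (popcount + scan of all n
-- rows per mask) by doubling the list of subset sums / parities once per row, then one
-- counting pass; equal return value on Pre_ (A raises IndexError on ragged rows).

-- ===== PORT A =====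
-- bin(mask).count("1") for mask ≥ 0
def pvPopcount : Nat → Nat
  | 0 => 0
  | n + 1 => pvPopcount ((n + 1) / 2) + (n + 1) % 2
decreasing_by exact Nat.div_lt_self (Nat.succ_pos n) (by omega)

-- the inner 'for j in range(len(s)): s[j] += row[j]' loop of A
def pvRowAdd (s row : List Int) : List Int :=
  (PySem.List.pyRange 0 (PySem.List.len s) 1).foldl
    (fun s' j => PySem.List.pySetD s' j (PySem.List.pyGetD s' j 0 + PySem.List.pyGetD row j 0)) s

-- the body of A's 'for i in range(n): if (mask >> i) & 1: ...' loop
def pvStep (rows : List (List Int)) (mask : Int) (s : List Int) (i : Int) : List Int :=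
  if mask.toNat.testBit i.toNat then pvRowAdd s (PySem.List.pyGetD rows i []) else s

-- the subset-sum vector s that A computes for one mask
def pvSumA (rows : List (List Int)) (mask : Int) : List Int :=
  (PySem.List.pyRange 0 (PySem.List.len rows) 1).foldl (pvStep rows mask)
    (List.replicate (PySem.List.pyGetD rows 0 []).length 0)

def subset_sums_with_parity (rows : List (List Int)) : (List (List Int × Int)) × (List (List Int × Int)) :=
  let n := rows.length
  let final :=
    (PySem.List.pyRange 0 ((2 : Int) ^ n) 1).foldl
      (fun (acc : PySem.Dict (List Int) Int × PySem.Dict (List Int) Int) mask =>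
        let parity := pvPopcount mask.toNat % 2
        let s := pvSumA rows mask
        if parity = 0 then (acc.1.modify s 0 (· + 1), acc.2)
        else (acc.1, acc.2.modify s 0 (· + 1)))
      (PySem.Dict.empty, PySem.Dict.empty)
  (final.1.items, final.2.items)

-- ===== PORT B =====
def subset_sums_with_parity_alt (rows : List (List Int)) : (List (List Int × Int)) × (List (List Int × Int)) :=
  let d := (PySem.List.pyGetD rows 0 []).length
  let sp :=
    rows.foldl
      (fun (sp : List (List Int) × List Bool) row =>
        (sp.1 ++ sp.1.map (fun s => (s.zip row).map (fun ab => ab.1 + ab.2)),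
         sp.2 ++ sp.2.map (fun p => !p)))
      ([List.replicate d 0], [false])
  let final :=
    (sp.1.zip sp.2).foldl
      (fun (acc : PySem.Dict (List Int) Int × PySem.Dict (List Int) Int) q =>
        if !q.2 then (acc.1.modify q.1 0 (· + 1), acc.2)
        else (acc.1, acc.2.modify q.1 0 (· + 1)))
      (PySem.Dict.empty, PySem.Dict.empty)
  (final.1.items, final.2.items)

-- ===== PRECONDITION & SPEC =====
-- Pre_ excludes exactly the inputs on which A raises IndexError: the empty list
-- (rows[0]) and lists containing a row shorter than rows[0] (row[j] in the inner loop).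
def Pre_subset_sums_with_parity (rows : List (List Int)) : Prop :=
  rows ≠ [] ∧ ∀ r ∈ rows, (rows.headD []).length ≤ r.length
instance (rows : List (List Int)) : Decidable (Pre_subset_sums_with_parity rows) := by
  unfold Pre_subset_sums_with_parity; infer_instance
def pvWitness_subset_sums_with_parity : List (List Int) := [[1, 2], [3, -1]]

def Spec_subset_sums_with_parity (rows : List (List Int)) (out : (List (List Int × Int)) × (List (List Int × Int))) : Prop := out = subset_sums_with_parity_alt rows
instance (rows : List (List Int)) (out : (List (List Int × Int)) × (List (List Int × Int))) : Decidable (Spec_subset_sums_with_parity rows out) := by unfold Spec_subset_sums_with_parity; infer_instance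

-- ===== CLAIM (what is proved, stated in full; the proofs are below) =====
def Claim_equal_subset_sums_with_parity : Prop := ∀ (rows : List (List Int)), Dom_subset_sums_with_parity rows → Pre_subset_sums_with_parity rows → Spec_subset_sums_with_parity rows (subset_sums_with_parity rows)

-- ===== LEMMAS AND PROOFS =====

theorem pvPopcount_zero : pvPopcount 0 = 0 := by simp [pvPopcount]

theorem pvPopcount_half (m : ℕ) : pvPopcount m = pvPopcount (m / 2) + m % 2 := by
  cases m with
  | zero => simp [pvPopcount]
  | succ n => rw [pvPopcount]

theorem pvPopcount_add_pow : ∀ (k m : ℕ), m < 2 ^ k → pvPopcount (2 ^ k + m) = pvPopcount m + 1 := by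
  intro k
  induction k with
  | zero =>
      intro m hm
      have hm0 : m = 0 := by omega
      subst hm0
      rw [show (2 : ℕ) ^ 0 + 0 = 1 from rfl, pvPopcount_half 1, pvPopcount_zero]
  | succ k ih =>
      intro m hm
      have ha : (2 : ℕ) ^ (k + 1) = 2 * 2 ^ k := by ring
      have h2 : (2 ^ (k + 1) + m) / 2 = 2 ^ k + m / 2 := by omega
      have h3 : (2 ^ (k + 1) + m) % 2 = m % 2 := by omega
      rw [pvPopcount_half (2 ^ (k + 1) + m), h2, h3, ih (m / 2) (by omega),
          pvPopcount_half m]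
      omega

theorem length_foldl_pySetD (f : List Int → Int → Int) :
    ∀ (l : List Int) (s : List Int),
      (l.foldl (fun s' j => PySem.List.pySetD s' j (f s' j)) s).length = s.length := by
  intro l
  induction l with
  | nil => intro s; rfl
  | cons x t ih =>
      intro s
      simp only [List.foldl_cons, ih, PySem.List.length_pySetD]

theorem length_pvRowAdd (s row : List Int) : (pvRowAdd s row).length = s.length := by
  unfold pvRowAdd; exact length_foldl_pySetD _ _ s

theorem length_foldl_pvStep (rows : List (List Int)) (mask : Int) :
    ∀ (l : List Int) (init : List Int),
      (l.foldl (pvStep rows mask) init).length = init.length := by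
  intro l
  induction l with
  | nil => intro init; rfl
  | cons x t ih =>
      intro init
      simp only [List.foldl_cons, ih]
      unfold pvStep
      split
      · exact length_pvRowAdd _ _
      · rfl

-- the in-place 'for j: s[j] += row[j]' loop is elementwise zip-addition
theorem inplaceAdd (row : List Int) :
    ∀ (suf pre : List Int), pre.length + suf.length ≤ row.length →
      (PySem.List.pyRange (pre.length : Int) ((pre.length : Int) + (suf.length : Int)) 1).foldl
        (fun s' j => PySem.List.pySetD s' j (PySem.List.pyGetD s' j 0 + PySem.List.pyGetD row j 0))
        (pre ++ suf)
      = pre ++ (suf.zip (row.drop pre.length)).map (fun ab => ab.1 + ab.2) := by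
  intro suf
  induction suf with
  | nil =>
      intro pre h
      simp only [List.length_nil, Nat.cast_zero, add_zero]
      rw [PySem.List.pyRange_one_eq_nil (le_refl _)]
      simp
  | cons x rest ih =>
      intro pre h
      have hlen : pre.length + (rest.length + 1) ≤ row.length := by
        simpa using h
      have hlt : pre.length < row.length := by omega
      rw [PySem.List.pyRange_one_cons (by
        have : (0 : Int) < ((x :: rest).length : Int) := by exact_mod_cast Nat.succ_pos rest.length
        omega)]
      simp only [List.foldl_cons]
      have hget_s : PySem.List.pyGetD (pre ++ x :: rest) (pre.length : Int) 0 = x := by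
        rw [PySem.List.pyGetD_natCast]
        simp [List.getD_eq_getElem?_getD]
      have hget_r : PySem.List.pyGetD row (pre.length : Int) 0 = row[pre.length] := by
        rw [PySem.List.pyGetD_natCast]
        simp [List.getD_eq_getElem?_getD, List.getElem?_eq_getElem hlt]
      have hset : PySem.List.pySetD (pre ++ x :: rest) (pre.length : Int) (x + row[pre.length])
          = (pre ++ [x + row[pre.length]]) ++ rest := by
        rw [PySem.List.pySetD_natCast, List.set_append]
        simp
      rw [hget_s, hget_r, hset]
      have harg1 : ((pre.length : Int) + 1) = (((pre ++ [x + row[pre.length]]).length : Int)) := by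
        simp
      have harg2 : ((pre.length : Int) + ((x :: rest).length : Int))
          = (((pre ++ [x + row[pre.length]]).length : Int) + (rest.length : Int)) := by
        simp
        ring
      rw [harg1, harg2, ih (pre ++ [x + row[pre.length]]) (by simp; omega)]
      have hdrop : row.drop pre.length = row[pre.length] :: row.drop (pre.length + 1) :=
        List.drop_eq_getElem_cons hlt
      rw [hdrop]
      simp only [List.append_assoc, List.cons_append, List.nil_append]
      rw [List.zip_cons_cons]
      simp

theorem pvRowAdd_eq_zip (s row : List Int) (h : s.length ≤ row.length) :
    pvRowAdd s row = (s.zip row).map (fun ab => ab.1 + ab.2) := by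
  have := inplaceAdd row s [] (by simpa using h)
  simpa using this

-- a window of loop iterations whose mask bits are all clear does nothing
theorem fold_window (rows : List (List Int)) (mask : Int) (a b : Int) (init : List Int)
    (h : ∀ i : Int, a ≤ i → i < b → mask.toNat.testBit i.toNat = false) :
    (PySem.List.pyRange a b 1).foldl (pvStep rows mask) init = init := by
  refine (PySem.List.foldl_congr_mem _ _ (fun s _ => s) _ ?_).trans
    (PySem.List.foldl_ignore _ _)
  intro acc i hi
  rw [PySem.List.mem_pyRange_one] at hi
  unfold pvStep
  rw [h i hi.1 hi.2]
  rfl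

-- two masks agreeing on a window of bits fold identically over that window
theorem fold_congr_window (rows : List (List Int)) (mask mask' : Int) (a b : Int) (init : List Int)
    (h : ∀ i : Int, a ≤ i → i < b → mask.toNat.testBit i.toNat = mask'.toNat.testBit i.toNat) :
    (PySem.List.pyRange a b 1).foldl (pvStep rows mask) init
      = (PySem.List.pyRange a b 1).foldl (pvStep rows mask') init := by
  refine PySem.List.foldl_congr_mem _ _ _ _ ?_
  intro acc i hi
  rw [PySem.List.mem_pyRange_one] at hi
  unfold pvStep
  rw [h i hi.1 hi.2]

theorem pvSumA_zero (rows : List (List Int)) :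
    pvSumA rows 0 = List.replicate (PySem.List.pyGetD rows 0 []).length 0 := by
  unfold pvSumA
  exact fold_window _ _ _ _ _ (by intro i _ _; simp [Nat.zero_testBit])

theorem pvSumA_shift (rows : List (List Int))
    (hpre : ∀ r ∈ rows, (PySem.List.pyGetD rows 0 []).length ≤ r.length)
    (k : ℕ) (hk : k < rows.length) (m : ℕ) (hm : m < 2 ^ k) :
    pvSumA rows ((2 ^ k + m : ℕ) : Int)
      = ((pvSumA rows (m : Int)).zip rows[k]).map (fun ab => ab.1 + ab.2) := by
  have hd : (PySem.List.pyGetD rows 0 []).length ≤ rows[k].length :=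
    hpre _ (List.getElem_mem hk)
  have hrowk : PySem.List.pyGetD rows ((k : ℕ) : Int) [] = rows[k] := by
    rw [PySem.List.pyGetD_natCast]
    simp [List.getD_eq_getElem?_getD, List.getElem?_eq_getElem hk]
  have hlt2 : (2 : ℕ) ^ k + m < 2 ^ (k + 1) := by
    have : (2 : ℕ) ^ (k + 1) = 2 ^ k + 2 ^ k := by ring
    omega
  unfold pvSumA
  simp only [PySem.List.len_eq]
  rw [PySem.List.pyRange_one_append 0 (k : Int) (rows.length : Int)
        (by exact_mod_cast Nat.zero_le k) (by exact_mod_cast hk.le),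
      PySem.List.pyRange_one_cons (a := (k : Int)) (b := (rows.length : Int))
        (by exact_mod_cast hk)]
  simp only [List.foldl_append, List.foldl_cons]
  rw [fold_congr_window rows ((2 ^ k + m : ℕ) : Int) ((m : ℕ) : Int) 0 (k : Int)
    (List.replicate (PySem.List.pyGetD rows 0 []).length 0) (by
      intro i h0 hik
      have hi : i.toNat < k := by omega
      simp only [Int.toNat_natCast]
      rw [Nat.testBit_two_pow_add_gt hi])]
  have hmidbig : pvStep rows ((2 ^ k + m : ℕ) : Int)
      ((PySem.List.pyRange 0 (k : Int) 1).foldl (pvStep rows ((m : ℕ) : Int))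
        (List.replicate (PySem.List.pyGetD rows 0 []).length 0)) (k : Int)
      = pvRowAdd
        ((PySem.List.pyRange 0 (k : Int) 1).foldl (pvStep rows ((m : ℕ) : Int))
          (List.replicate (PySem.List.pyGetD rows 0 []).length 0)) rows[k] := by
    unfold pvStep
    simp only [Int.toNat_natCast]
    rw [Nat.testBit_two_pow_add_eq, Nat.testBit_lt_two_pow hm, hrowk]
    rfl
  have hmidsmall : pvStep rows ((m : ℕ) : Int)
      ((PySem.List.pyRange 0 (k : Int) 1).foldl (pvStep rows ((m : ℕ) : Int))
        (List.replicate (PySem.List.pyGetD rows 0 []).length 0)) (k : Int)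
      = (PySem.List.pyRange 0 (k : Int) 1).foldl (pvStep rows ((m : ℕ) : Int))
        (List.replicate (PySem.List.pyGetD rows 0 []).length 0) := by
    unfold pvStep
    simp only [Int.toNat_natCast]
    rw [Nat.testBit_lt_two_pow hm]
    rfl
  rw [hmidbig, hmidsmall]
  rw [fold_window rows ((2 ^ k + m : ℕ) : Int) ((k : Int) + 1) (rows.length : Int) _ (by
      intro i hi1 hi2
      simp only [Int.toNat_natCast]
      have hik : k + 1 ≤ i.toNat := by omega
      exact Nat.testBit_lt_two_pow
        (lt_of_lt_of_le hlt2 (Nat.pow_le_pow_right (by omega) hik)))]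
  rw [fold_window rows ((m : ℕ) : Int) ((k : Int) + 1) (rows.length : Int) _ (by
      intro i hi1 hi2
      simp only [Int.toNat_natCast]
      have hik : k + 1 ≤ i.toNat := by omega
      refine Nat.testBit_lt_two_pow (lt_of_lt_of_le hm (Nat.pow_le_pow_right (by omega) (by omega))))]
  exact pvRowAdd_eq_zip _ _ (by rw [length_foldl_pvStep]; simpa using hd)

theorem sums_eq (rows : List (List Int))
    (hpre : ∀ r ∈ rows, (PySem.List.pyGetD rows 0 []).length ≤ r.length) :
    ∀ (k : ℕ), k ≤ rows.length →
      ((rows.take k).foldl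
        (fun acc row => acc ++ acc.map (fun s => (s.zip row).map (fun ab => ab.1 + ab.2)))
        [List.replicate (PySem.List.pyGetD rows 0 []).length 0])
      = (List.range (2 ^ k)).map (fun m : ℕ => pvSumA rows (m : Int)) := by
  intro k
  induction k with
  | zero =>
      intro _
      simp [List.range_one, pvSumA_zero]
  | succ k ih =>
      intro hk1
      have hk : k < rows.length := by omega
      rw [List.take_add_one, List.getElem?_eq_getElem hk]
      simp only [Option.toList_some, List.foldl_append, List.foldl_cons, List.foldl_nil]
      rw [ih (by omega)]
      have hsplit : (2 : ℕ) ^ (k + 1) = 2 ^ k + 2 ^ k := by ring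
      rw [hsplit, List.range_add, List.map_append, List.map_map, List.map_map]
      congr 1
      apply List.map_congr_left
      intro m hm
      rw [List.mem_range] at hm
      simp only [Function.comp_apply]
      exact (pvSumA_shift rows hpre k hk m hm).symm

theorem pars_eq (rows : List (List Int)) :
    ∀ (k : ℕ), k ≤ rows.length →
      ((rows.take k).foldl (fun acc (_ : List Int) => acc ++ acc.map (fun p => !p)) [false])
      = (List.range (2 ^ k)).map (fun m : ℕ => decide (pvPopcount m % 2 = 1)) := by
  intro rows2
  induction rows2 with
  | zero =>
      intro _
      simp [List.range_one, pvPopcount_zero]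
  | succ k ih =>
      intro hk1
      have hk : k < rows.length := by omega
      rw [List.take_add_one, List.getElem?_eq_getElem hk]
      simp only [Option.toList_some, List.foldl_append, List.foldl_cons, List.foldl_nil]
      rw [ih (by omega)]
      have hsplit : (2 : ℕ) ^ (k + 1) = 2 ^ k + 2 ^ k := by ring
      rw [hsplit, List.range_add, List.map_append, List.map_map, List.map_map]
      congr 1
      apply List.map_congr_left
      intro m hm
      rw [List.mem_range] at hm
      simp only [Function.comp_apply]
      rw [pvPopcount_add_pow k m hm]
      rcases Nat.mod_two_eq_zero_or_one (pvPopcount m) with h | h <;>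
        simp [Nat.add_mod, h]

theorem equal_main : ∀ (rows : List (List Int)), Pre_subset_sums_with_parity rows →
    subset_sums_with_parity rows = subset_sums_with_parity_alt rows := by
  intro rows hpre
  obtain ⟨hne, hall⟩ := hpre
  have hall' : ∀ r ∈ rows, (PySem.List.pyGetD rows 0 []).length ≤ r.length := by
    intro r hr
    have hhead : PySem.List.pyGetD rows 0 [] = rows.headD [] := by
      cases rows with
      | nil => rfl
      | cons a t => simp [PySem.List.pyGetD_zero_cons]
    rw [hhead]; exact hall r hr
  simp only [subset_sums_with_parity, subset_sums_with_parity_alt]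
  have hsp : rows.foldl
        (fun (sp : List (List Int) × List Bool) row =>
          (sp.1 ++ sp.1.map (fun s => (s.zip row).map (fun ab => ab.1 + ab.2)),
           sp.2 ++ sp.2.map (fun p => !p)))
        ([List.replicate (PySem.List.pyGetD rows 0 []).length 0], [false])
      = (rows.foldl
          (fun acc row => acc ++ acc.map (fun s => (s.zip row).map (fun ab => ab.1 + ab.2)))
          [List.replicate (PySem.List.pyGetD rows 0 []).length 0],
         rows.foldl (fun acc (_ : List Int) => acc ++ acc.map (fun p => !p)) [false]) :=
    PySem.List.foldl_prod_mk
      (fun (acc : List (List Int)) (row : List Int) =>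
        acc ++ acc.map (fun s => (s.zip row).map (fun ab => ab.1 + ab.2)))
      (fun (acc : List Bool) (_ : List Int) => acc ++ acc.map (fun p => !p)) rows _ _
  rw [hsp]
  simp only
  rw [show rows.foldl
        (fun acc row => acc ++ acc.map (fun s => (s.zip row).map (fun ab => ab.1 + ab.2)))
        [List.replicate (PySem.List.pyGetD rows 0 []).length 0]
      = (rows.take rows.length).foldl
        (fun acc row => acc ++ acc.map (fun s => (s.zip row).map (fun ab => ab.1 + ab.2)))
        [List.replicate (PySem.List.pyGetD rows 0 []).length 0] from by rw [List.take_length]]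
  rw [show rows.foldl (fun acc (_ : List Int) => acc ++ acc.map (fun p => !p)) [false]
      = (rows.take rows.length).foldl (fun acc (_ : List Int) => acc ++ acc.map (fun p => !p)) [false]
      from by rw [List.take_length]]
  rw [sums_eq rows hall' rows.length (le_refl _), pars_eq rows rows.length (le_refl _),
      List.zip_map', List.foldl_map]
  rw [PySem.List.pyRange_one 0 ((2 : Int) ^ rows.length)]
  rw [show (((2 : Int) ^ rows.length - 0).toNat) = 2 ^ rows.length from by
        have h2 : ((2 : Int) ^ rows.length) = ((2 ^ rows.length : ℕ) : Int) := by push_cast; rfl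
        rw [sub_zero, h2, Int.toNat_natCast]]
  rw [List.foldl_map]
  refine congrArg (fun z : (PySem.Dict (List Int) Int × PySem.Dict (List Int) Int) =>
    (z.1.items, z.2.items)) ?_
  refine PySem.List.foldl_congr_mem _ _ _ _ ?_
  intro acc m _
  simp only [zero_add, Int.toNat_natCast]
  rcases Nat.mod_two_eq_zero_or_one (pvPopcount m) with h | h <;> simp [h]

-- ===== VERDICT (by name: the statement is the Claim_ definition above) =====
theorem subset_sums_with_parity_spec : Claim_equal_subset_sums_with_parity := by
  intro rows _ hpre
  unfold Spec_subset_sums_with_parity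
  exact equal_main rows hpre
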